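-- pv_equiv track=rewrite | github.com/dtlafever/AdventOfCode2024 | src/day5.py | get_max_index_from_list_of_numbers
-- ===== SOURCE A (Python) =====
-- def get_max_index_from_list_of_numbers(update: list[str], set_of_nums: set[str]) -> int:
--     """
--     Get the maximum index of the number in the update list
--     :param update: the list to search
--     :param set_of_nums: the set of numbers to search in the update list
--     :return: the maximum index of the number in the list
--     """
--     max_index = -1
--     try:
--         num_indices = [update.index(num) for num in set_of_nums]
--         max_index = max(num_indices)
--     except ValueError:
--         # not found in the list, so we just do nothing and return -1
--         pass
--     return max_index
-- ===== SOURCE B (Python) =====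
-- def get_max_index_from_list_of_numbers(update: list[str], set_of_nums: set[str]) -> int:
--     """Single pass over update: record the index of each first occurrence of a
--     wanted number; -1 if any wanted number is missing (or the set is empty)."""
--     remaining = set(set_of_nums)
--     max_index = -1
--     for i, num in enumerate(update):
--         if num in remaining:
--             remaining.discard(num)
--             max_index = i
--     return -1 if remaining else max_index
-- ===== Notes on version B (the rewrite author's own statement) =====
-- stated objective: alternative
-- what changed: Replaces the per-element list.index scans plus max() over the collected indices by a single left-to-right pass over update that records the index of each first occurrence of a still-wanted number and checks at the end that none is missing.
import Mathlib
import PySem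

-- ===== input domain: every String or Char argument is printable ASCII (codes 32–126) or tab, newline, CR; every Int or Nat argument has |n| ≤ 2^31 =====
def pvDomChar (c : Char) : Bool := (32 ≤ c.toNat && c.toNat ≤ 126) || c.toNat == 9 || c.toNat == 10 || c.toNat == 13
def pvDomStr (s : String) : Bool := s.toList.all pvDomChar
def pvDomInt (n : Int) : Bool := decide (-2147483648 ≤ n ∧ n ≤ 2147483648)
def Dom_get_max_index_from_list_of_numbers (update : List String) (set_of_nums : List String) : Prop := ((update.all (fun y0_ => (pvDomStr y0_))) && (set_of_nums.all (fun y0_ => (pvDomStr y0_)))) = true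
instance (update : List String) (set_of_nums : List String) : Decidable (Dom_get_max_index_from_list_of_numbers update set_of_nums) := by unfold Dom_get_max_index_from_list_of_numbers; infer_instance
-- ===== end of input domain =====

-- B replaces A's per-element list.index scans + max() by one pass over update with a
-- shrinking set of still-wanted numbers (objective: alternative, one pass instead of nested scans).

-- ===== PORT A =====
-- max_index = -1; try: num_indices = [update.index(num) for num in set_of_nums];
-- max_index = max(num_indices); except ValueError: pass; return max_index
def get_max_index_from_list_of_numbers (update : List String) (set_of_nums : List String) : Int :=
  match set_of_nums.mapM (fun num => PySem.List.index? update num) with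
  | none => -1
  | some num_indices =>
    match PySem.List.max? (num_indices.map (fun i => (i : Int))) (fun x => x) with
    | none => -1
    | some m => m

-- ===== PORT B =====
def get_max_index_from_list_of_numbers_alt (update : List String) (set_of_nums : List String) : Int :=
  let res := (PySem.List.enumerate update).foldl
    (fun (st : PySem.Set String × Int) (p : Int × String) =>
      if PySem.Set.contains st.1 p.2 then (PySem.Set.discard st.1 p.2, p.1) else st)
    (PySem.Set.ofList set_of_nums, -1)
  if res.1.isEmpty then res.2 else -1

-- ===== PRECONDITION & SPEC =====
def Spec_get_max_index_from_list_of_numbers (update : List String) (set_of_nums : List String) (out : Int) : Prop := out = get_max_index_from_list_of_numbers_alt update set_of_nums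
instance (update : List String) (set_of_nums : List String) (out : Int) : Decidable (Spec_get_max_index_from_list_of_numbers update set_of_nums out) := by unfold Spec_get_max_index_from_list_of_numbers; infer_instance

-- ===== CLAIM (what is proved, stated in full; the proofs are below) =====
def Claim_equal_get_max_index_from_list_of_numbers : Prop := ∀ (update : List String) (set_of_nums : List String), Dom_get_max_index_from_list_of_numbers update set_of_nums → Spec_get_max_index_from_list_of_numbers update set_of_nums (get_max_index_from_list_of_numbers update set_of_nums)

-- ===== LEMMAS AND PROOFS =====
theorem pv_idxOf?_of_mem (v : String) (xs : List String) (h : v ∈ xs) :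
    List.idxOf? v xs = some (List.idxOf v xs) := by
  induction xs with
  | nil => simp at h
  | cons x t ih =>
    by_cases hx : x = v
    · subst hx; simp [List.idxOf?_cons]
    · have hv : v ∈ t := by rcases List.mem_cons.mp h with h' | h'; exact absurd h'.symm hx; exact h'
      simp [List.idxOf?_cons, hx, ih hv]

theorem pv_mapM_some (update : List String) (l : List String) (h : ∀ n ∈ l, n ∈ update) :
    l.mapM (fun num => PySem.List.index? update num)
      = some (l.map (fun n => List.idxOf n update)) := by
  induction l with
  | nil => rfl
  | cons x t ih =>
    simp only [List.mapM_cons, List.map_cons]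
    rw [ih (fun n hn => h n (List.mem_cons_of_mem _ hn))]
    rw [PySem.List.index?_eq_idxOf?, pv_idxOf?_of_mem x update (h x List.mem_cons_self)]
    rfl

theorem pv_mapM_none (update : List String) (l : List String) (h : ¬ ∀ n ∈ l, n ∈ update) :
    l.mapM (fun num => PySem.List.index? update num) = none := by
  induction l with
  | nil => exact absurd (by simp) h
  | cons x t ih =>
    simp only [List.mapM_cons]
    by_cases hx : x ∈ update
    · have ht : ¬ ∀ n ∈ t, n ∈ update := fun ha =>
        h (fun n hn => (List.mem_cons.mp hn).elim (fun h' => h' ▸ hx) (fun h' => ha n h'))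
      rw [ih ht, PySem.List.index?_eq_idxOf?, pv_idxOf?_of_mem x update hx]; rfl
    · rw [PySem.List.index?_eq_idxOf?, List.idxOf?_eq_none_iff.mpr hx]; rfl

def pvIdxList (update l : List String) : List Int :=
  (l.filter (fun n => update.contains n)).map (fun n => ((List.idxOf n update : Nat) : Int))

theorem pv_max?_id_unique (l : List Int) (m : Int) (hm : m ∈ l) (hmax : ∀ y ∈ l, y ≤ m) :
    PySem.List.max? l (fun x => x) = some m := by
  cases h : PySem.List.max? l (fun x => x) with
  | none => rw [PySem.List.max?_eq_none_iff] at h; simp [h] at hm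
  | some v =>
    have h1 : v ≤ m := hmax v (PySem.List.max?_mem h)
    have h2 : m ≤ v := PySem.List.max?_isMax h m hm
    exact congrArg some (le_antisymm h1 h2)

theorem pv_mem_pvIdxList (update l : List String) (y : Int) :
    y ∈ pvIdxList update l ↔ ∃ n ∈ l, n ∈ update ∧ y = ((List.idxOf n update : Nat) : Int) := by
  simp [pvIdxList, List.mem_map, List.mem_filter, List.contains_iff_mem]
  constructor
  · rintro ⟨n, ⟨hn, hu⟩, hy⟩; exact ⟨n, hn, hu, hy.symm⟩
  · rintro ⟨n, hn, hu, hy⟩; exact ⟨n, ⟨hn, hu⟩, hy.symm⟩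

theorem pv_foldB (update : List String) : ∀ (s : List String) (k m : Int),
    (PySem.List.enumerate update k).foldl
      (fun (st : PySem.Set String × Int) (p : Int × String) =>
        if PySem.Set.contains st.1 p.2 then (PySem.Set.discard st.1 p.2, p.1) else st)
      (s, m)
    = (s.filter (fun x => !update.contains x),
       match PySem.List.max? (pvIdxList update s) (fun x => x) with
       | none => m
       | some v => k + v) := by
  induction update with
  | nil =>
    intro s k m
    simp [PySem.List.enumerate, pvIdxList, PySem.List.max?]
  | cons x rest ih =>
    intro s k m
    rw [PySem.List.enumerate_cons, List.foldl_cons]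
    by_cases hx : x ∈ s
    · rw [if_pos (by simpa [PySem.Set.contains, List.contains_iff_mem] using hx)]
      rw [ih (PySem.Set.discard s x) (k+1) k]
      simp only [PySem.Set.discard]
      refine Prod.ext ?_ ?_
      · show (s.filter (fun y => !(y == x))).filter (fun y => !rest.contains y)
            = s.filter (fun y => !(x :: rest).contains y)
        rw [List.filter_filter]
        refine List.filter_congr (fun y _ => ?_)
        by_cases h : y = x
        · subst h; simp [List.contains_cons]
        · simp [List.contains_cons, h, beq_eq_false_iff_ne.mpr h, Bool.not_or, Bool.and_comm]
      · show (match PySem.List.max? (pvIdxList rest (s.filter (fun y => !(y == x)))) (fun x => x) with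
              | none => k | some v => (k+1) + v)
            = (match PySem.List.max? (pvIdxList (x :: rest) s) (fun x => x) with
              | none => m | some v => k + v)
        cases h' : PySem.List.max? (pvIdxList rest (s.filter (fun y => !(y == x)))) (fun x => x) with
        | none =>
          rw [PySem.List.max?_eq_none_iff] at h'
          have hmax : PySem.List.max? (pvIdxList (x :: rest) s) (fun x => x) = some 0 := by
            apply pv_max?_id_unique
            · exact (pv_mem_pvIdxList _ _ _).mpr ⟨x, hx, List.mem_cons_self, by simp [List.idxOf_cons]⟩
            · intro y hy
              rcases (pv_mem_pvIdxList _ _ _).mp hy with ⟨n, hn, hu, rfl⟩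
              by_cases hnx : n = x
              · subst hnx; simp [List.idxOf_cons]
              · exfalso
                have hnr : n ∈ rest := by
                  rcases List.mem_cons.mp hu with h'' | h''; exact absurd h'' hnx; exact h''
                have : ((List.idxOf n rest : Nat) : Int) ∈ pvIdxList rest (s.filter (fun y => !(y == x))) :=
                  (pv_mem_pvIdxList _ _ _).mpr ⟨n, List.mem_filter.mpr ⟨hn, by simp [hnx]⟩, hnr, rfl⟩
                simp [h'] at this
          rw [hmax]; simp
        | some v =>
          have hv0 : 0 ≤ v := by
            rcases (pv_mem_pvIdxList _ _ _).mp (PySem.List.max?_mem h') with ⟨n, _, _, rfl⟩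
            positivity
          have hmax : PySem.List.max? (pvIdxList (x :: rest) s) (fun x => x) = some (v + 1) := by
            apply pv_max?_id_unique
            · rcases (pv_mem_pvIdxList _ _ _).mp (PySem.List.max?_mem h') with ⟨n, hn, hnr, rfl⟩
              have hnx : (n == x) = false := by
                have := (List.mem_filter.mp hn).2; simpa using this
              refine (pv_mem_pvIdxList _ _ _).mpr ⟨n, (List.mem_filter.mp hn).1, List.mem_cons_of_mem _ hnr, ?_⟩
              have hne : n ≠ x := by simpa using hnx
              have hf : (x == n) = false := beq_eq_false_iff_ne.mpr (Ne.symm hne)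
              rw [List.idxOf_cons, hf]
              simp only [cond_false]
              push_cast; ring
            · intro y hy
              rcases (pv_mem_pvIdxList _ _ _).mp hy with ⟨n, hn, hu, rfl⟩
              by_cases hnx : n = x
              · subst hnx; simp [List.idxOf_cons]; omega
              · have hnr : n ∈ rest := by
                  rcases List.mem_cons.mp hu with h'' | h''; exact absurd h'' hnx; exact h''
                have hle : ((List.idxOf n rest : Nat) : Int) ≤ v := by
                  apply PySem.List.max?_isMax h'
                  exact (pv_mem_pvIdxList _ _ _).mpr ⟨n, List.mem_filter.mpr ⟨hn, by simp [hnx]⟩, hnr, rfl⟩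
                have hxn : (x == n) = false := by
                  cases h'' : x == n
                  · rfl
                  · exact absurd (eq_of_beq h'').symm hnx
                rw [List.idxOf_cons, hxn]
                simp only [cond_false]
                push_cast
                omega
          rw [hmax]; ring_nf
    · rw [if_neg (by simpa [PySem.Set.contains, List.contains_iff_mem] using hx)]
      rw [ih s (k+1) m]
      have hcongr : ∀ y ∈ s, (rest.contains y) = ((x :: rest).contains y) := by
        intro y hy
        have : (y == x) = false := by
          cases h'' : y == x
          · rfl
          · exact absurd (eq_of_beq h'') (fun e => hx (e ▸ hy))
        simp only [List.contains_cons, this, Bool.false_or]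
      refine Prod.ext ?_ ?_
      · show s.filter (fun y => !rest.contains y) = s.filter (fun y => !(x :: rest).contains y)
        exact List.filter_congr (fun y hy => by rw [hcongr y hy])
      · show (match PySem.List.max? (pvIdxList rest s) (fun x => x) with
              | none => m | some v => (k+1) + v)
            = (match PySem.List.max? (pvIdxList (x :: rest) s) (fun x => x) with
              | none => m | some v => k + v)
        have hlist : pvIdxList (x :: rest) s = (pvIdxList rest s).map (fun y => y + 1) := by
          unfold pvIdxList
          rw [← List.filter_congr (fun y hy => (hcongr y hy)), List.map_map]
          refine List.map_congr_left (fun n hn => ?_)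
          have hns : n ∈ s := (List.mem_filter.mp hn).1
          have hxn : (x == n) = false := by
            cases h'' : x == n
            · rfl
            · exact absurd (eq_of_beq h'').symm (fun e => hx (e ▸ hns))
          simp only [Function.comp, List.idxOf_cons, hxn, cond_false]
          push_cast; ring
        rw [hlist]
        cases h' : PySem.List.max? (pvIdxList rest s) (fun x => x) with
        | none =>
          rw [PySem.List.max?_eq_none_iff] at h'
          rw [h']; simp [PySem.List.max?]
        | some v =>
          have hmax : PySem.List.max? ((pvIdxList rest s).map (fun y => y + 1)) (fun x => x) = some (v + 1) := by
            apply pv_max?_id_unique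
            · exact List.mem_map.mpr ⟨v, PySem.List.max?_mem h', rfl⟩
            · intro y hy
              rcases List.mem_map.mp hy with ⟨z, hz, rfl⟩
              have := PySem.List.max?_isMax h' z hz
              omega
          rw [hmax]; ring_nf

theorem pv_cast_map (g : String → Nat) (l : List String) :
    (l.map g).map (fun i => (i : Int)) = l.map (fun n => ((g n : Nat) : Int)) := by
  induction l with
  | nil => rfl
  | cons a t ih => simpa using ih

theorem pv_main (update set_of_nums : List String) :
    get_max_index_from_list_of_numbers update set_of_nums
      = get_max_index_from_list_of_numbers_alt update set_of_nums := by
  unfold get_max_index_from_list_of_numbers get_max_index_from_list_of_numbers_alt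
  rw [pv_foldB update (PySem.Set.ofList set_of_nums) 0 (-1)]
  by_cases hall : ∀ n ∈ set_of_nums, n ∈ update
  · rw [pv_mapM_some update set_of_nums hall]
    have hfe : (PySem.Set.ofList set_of_nums).filter (fun x => !update.contains x) = [] :=
      List.filter_eq_nil_iff.mpr (fun a ha => by
        simp [List.contains_iff_mem, hall a ((PySem.Set.mem_ofList _ _).mp ha)])
    have hfull : pvIdxList update (PySem.Set.ofList set_of_nums)
        = (PySem.Set.ofList set_of_nums).map (fun n => ((List.idxOf n update : Nat) : Int)) := by
      unfold pvIdxList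
      rw [List.filter_eq_self.mpr (fun a ha =>
        List.contains_iff_mem.mpr (hall a ((PySem.Set.mem_ofList _ _).mp ha)))]
    have hmm : (set_of_nums.map (fun n => List.idxOf n update)).map (fun i => (i : Int))
        = set_of_nums.map (fun n => ((List.idxOf n update : Nat) : Int)) :=
      pv_cast_map _ _
    simp only [hfe, hfull, hmm, List.isEmpty_nil, if_true]
    cases hs : set_of_nums with
    | nil => simp [PySem.Set.ofList, PySem.Set.empty, PySem.List.max?]
    | cons a t =>
      have hne : set_of_nums.map (fun n => ((List.idxOf n update : Nat) : Int)) ≠ [] := by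
        simp [hs]
      cases hA : PySem.List.max? (set_of_nums.map (fun n => ((List.idxOf n update : Nat) : Int))) (fun x => x) with
      | none => exact absurd (PySem.List.max?_eq_none_iff _ _ |>.mp hA) (by rw [← hs] at *; exact hne)
      | some v =>
        have hB : PySem.List.max? ((PySem.Set.ofList set_of_nums).map (fun n => ((List.idxOf n update : Nat) : Int))) (fun x => x) = some v := by
          apply pv_max?_id_unique
          · rcases List.mem_map.mp (PySem.List.max?_mem hA) with ⟨n, hn, rfl⟩
            exact List.mem_map.mpr ⟨n, (PySem.Set.mem_ofList _ _).mpr hn, rfl⟩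
          · intro y hy
            rcases List.mem_map.mp hy with ⟨n, hn, rfl⟩
            exact PySem.List.max?_isMax hA _ (List.mem_map.mpr ⟨n, (PySem.Set.mem_ofList _ _).mp hn, rfl⟩)
        rw [← hs, hB, hA]
        simp
  · rw [pv_mapM_none update set_of_nums hall]
    push_neg at hall
    rcases hall with ⟨n0, hn0, hn0u⟩
    have : n0 ∈ (PySem.Set.ofList set_of_nums).filter (fun x => !update.contains x) :=
      List.mem_filter.mpr ⟨(PySem.Set.mem_ofList _ _).mpr hn0, by simp [List.contains_iff_mem, hn0u]⟩
    have hne : ((PySem.Set.ofList set_of_nums).filter (fun x => !update.contains x)).isEmpty = false := by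
      cases hh : ((PySem.Set.ofList set_of_nums).filter (fun x => !update.contains x)) with
      | nil => rw [hh] at this; simp at this
      | cons b u => rfl
    simp [hne]
    intro hc
    exact absurd (hc n0 hn0) hn0u

-- ===== VERDICT (by name: the statement is the Claim_ definition above) =====
theorem get_max_index_from_list_of_numbers_spec : Claim_equal_get_max_index_from_list_of_numbers := by
  intro update set_of_nums _
  unfold Spec_get_max_index_from_list_of_numbers
  exact pv_main update set_of_nums
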